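-- pv_equiv track=rewrite | github.com/OshkarVTec/plagiarism_detection | plagiarism.py | group_clusters
-- ===== SOURCE A (Python) =====
-- def merge_intervals(intervals):
--     """
--     Merge overlapping intervals in a list of (start, end) tuples.
--     """
--     if not intervals:
--         return []
--     intervals_sorted = sorted(intervals, key=lambda x: x[0])
--     merged = [intervals_sorted[0]]
--     for start, end in intervals_sorted[1:]:
--         prev_start, prev_end = merged[-1]
--         if start <= prev_end:  # overlap
--             merged[-1] = (prev_start, max(prev_end, end))
--         else:
--             merged.append((start, end))
--     return merged
--
-- def group_clusters(file_map, line_ranges, labels):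
--     clusters = {}
--     for idx, lab in enumerate(labels):
--         clusters.setdefault(lab, {}).setdefault(file_map[idx], []).append(
--             line_ranges[idx]
--         )
--
--     for lab, members in clusters.items():
--         for f, intervals in members.items():
--             clusters[lab][f] = merge_intervals(intervals)
--
--     return clusters
-- ===== SOURCE B (Python) =====
-- def _merged(intervals):
--     # Offline merge: sort, tabulate prefix maxima of ends, mark run boundaries
--     # from the table, group into runs, then aggregate each run.
--     ivs = sorted(intervals, key=lambda p: p[0])
--     if not ivs:
--         return []
--     ends = [e for _, e in ivs]
--     # pass 1: pmax[i] = max end among ivs[:i+1]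
--     pmax = ends[:1]
--     for e in ends[1:]:
--         pmax.append(max(pmax[-1], e))
--     # pass 2: an interval opens a new run iff its start exceeds the prefix maximum before it
--     new_run = [True] + [s > m for (s, _), m in zip(ivs[1:], pmax)]
--     # pass 3: group consecutive intervals into runs
--     runs = []
--     for iv, new in zip(ivs, new_run):
--         if new:
--             runs.append([iv])
--         else:
--             runs[-1].append(iv)
--     # pass 4: one merged interval per run
--     out = []
--     for run in runs:
--         m = run[0][1]
--         for _, e in run[1:]:
--             if e > m:
--                 m = e
--         out.append((run[0][0], m))
--     return out
--
-- def group_clusters(file_map, line_ranges, labels):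
--     clusters = {}
--     for f, rng, lab in zip(file_map, line_ranges, labels):
--         clusters.setdefault(lab, {}).setdefault(f, []).append(rng)
--     return {lab: {f: _merged(ivs) for f, ivs in members.items()}
--             for lab, members in clusters.items()}
-- ===== Notes on version B (the rewrite author's own statement) =====
-- stated objective: alternative
-- what changed: A merges each per-label/per-file interval list online, repeatedly comparing the next interval with the last merged interval and mutating merged[-1]; B is an offline staged pipeline: it tabulates prefix maxima of the sorted ends, derives all run boundaries from that table (start > prefix max before it), splits the list into runs by those flags and aggregates each run, and it rebuilds the nested result with dict comprehensions over a zip-built grouping instead of A's enumerate/indexing with in-place updates.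
import Mathlib
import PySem

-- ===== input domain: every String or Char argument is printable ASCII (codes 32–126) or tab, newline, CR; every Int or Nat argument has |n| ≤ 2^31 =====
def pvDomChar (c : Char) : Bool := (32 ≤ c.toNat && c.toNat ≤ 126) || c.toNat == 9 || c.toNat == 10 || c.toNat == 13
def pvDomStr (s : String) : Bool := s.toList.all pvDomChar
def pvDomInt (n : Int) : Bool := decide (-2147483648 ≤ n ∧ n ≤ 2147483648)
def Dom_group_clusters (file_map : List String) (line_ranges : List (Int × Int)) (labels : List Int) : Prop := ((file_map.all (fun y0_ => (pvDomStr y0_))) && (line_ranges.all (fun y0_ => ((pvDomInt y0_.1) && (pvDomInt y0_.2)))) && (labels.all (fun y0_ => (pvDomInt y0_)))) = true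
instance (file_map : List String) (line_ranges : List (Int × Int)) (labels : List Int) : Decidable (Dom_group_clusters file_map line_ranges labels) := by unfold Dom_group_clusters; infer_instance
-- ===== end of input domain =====

-- B replaces A's online merge (compare with merged[-1] and mutate it) by an offline staged
-- pipeline: tabulate prefix maxima of the sorted ends, mark run boundaries from that table,
-- group into runs and aggregate each run; the nested result is rebuilt with comprehensions
-- (alternative decomposition, no speed claim). Neither program mutates its arguments.

-- ===== PORT A =====
-- the for-loop of merge_intervals: 'merged' is the accumulator list, merged[-1] is updated in place
def pvMergeLoopA : List (Int × Int) → List (Int × Int) → List (Int × Int)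
  | merged, [] => merged
  | merged, (start, stop) :: rest =>
    let prev := merged.getLastD (0, 0)      -- merged[-1]; 'merged' is never empty when called
    if start ≤ prev.2 then
      pvMergeLoopA (merged.dropLast ++ [(prev.1, max prev.2 stop)]) rest
    else
      pvMergeLoopA (merged ++ [(start, stop)]) rest

def merge_intervals (intervals : List (Int × Int)) : List (Int × Int) :=
  if intervals = [] then []
  else
    let s := PySem.List.sorted intervals (fun x => x.1) false
    -- merged = [intervals_sorted[0]], loop over intervals_sorted[1:] (s is nonempty here)
    pvMergeLoopA (s.take 1) (s.drop 1)

-- first for-loop of group_clusters: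
-- for idx, lab in enumerate(labels): clusters.setdefault(lab, {}).setdefault(file_map[idx], []).append(line_ranges[idx])
-- (the pyGetD defaults are only reached outside Pre_, where the Python raises IndexError)
def pvCl1 (file_map : List String) (line_ranges : List (Int × Int)) (labels : List Int) :
    PySem.Dict Int (PySem.Dict String (List (Int × Int))) :=
  (PySem.List.enumerate labels 0).foldl (fun cl p =>
    cl.modify p.2 PySem.Dict.empty (fun inner =>
      inner.modify (PySem.List.pyGetD file_map p.1 "") []
        (fun ivs => ivs ++ [PySem.List.pyGetD line_ranges p.1 (0, 0)])))
    PySem.Dict.empty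

def group_clusters (file_map : List String) (line_ranges : List (Int × Int)) (labels : List Int) : List (Int × List (String × List (Int × Int))) :=
  let clusters := pvCl1 file_map line_ranges labels
  -- for lab, members in clusters.items(): for f, intervals in members.items():
  --     clusters[lab][f] = merge_intervals(intervals)
  let clusters2 := clusters.items.foldl (fun cl q =>
      cl.insert q.1 (q.2.items.foldl (fun m r => m.insert r.1 (merge_intervals r.2)) q.2)) clusters
  clusters2.items.map (fun q => (q.1, q.2.items))

-- ===== PORT B =====
-- _merged: sort, then four staged passes (prefix-max table, boundary flags, grouping, aggregation)
def pvMergedB (intervals : List (Int × Int)) : List (Int × Int) :=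
  let ivs := PySem.List.sorted intervals (fun p => p.1) false
  if ivs = [] then []
  else
    let ends := ivs.map (fun p => p.2)
    -- pass 1: pmax = ends[:1]; for e in ends[1:]: pmax.append(max(pmax[-1], e))
    let pmax := (ends.drop 1).foldl (fun pm e => pm ++ [max (pm.getLastD 0) e]) (ends.take 1)
    -- pass 2: new_run = [True] + [s > m for (s, _), m in zip(ivs[1:], pmax)]
    let newRun := true :: ((ivs.drop 1).zip pmax).map (fun t => decide (t.1.1 > t.2))
    -- pass 3: group consecutive intervals into runs (runs[-1].append = modify last)
    let runs := (ivs.zip newRun).foldl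
      (fun (rs : List (List (Int × Int))) t =>
        if t.2 then rs ++ [[t.1]] else rs.dropLast ++ [rs.getLastD [] ++ [t.1]]) []
    -- pass 4: one merged interval per run
    runs.foldl (fun out run =>
      out ++ [((run.headD (0, 0)).1,
        (run.drop 1).foldl (fun m p => if p.2 > m then p.2 else m) (run.headD (0, 0)).2)]) []

def group_clusters_alt (file_map : List String) (line_ranges : List (Int × Int)) (labels : List Int) : List (Int × List (String × List (Int × Int))) :=
  -- for f, rng, lab in zip(file_map, line_ranges, labels): clusters.setdefault(lab, {}).setdefault(f, []).append(rng)
  let clusters : PySem.Dict Int (PySem.Dict String (List (Int × Int))) :=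
    (file_map.zip (line_ranges.zip labels)).foldl (fun cl t =>
      cl.modify t.2.2 PySem.Dict.empty (fun inner =>
        inner.modify t.1 [] (fun ivs => ivs ++ [t.2.1]))) PySem.Dict.empty
  -- {lab: {f: _merged(ivs) for f, ivs in members.items()} for lab, members in clusters.items()}
  let out : PySem.Dict Int (PySem.Dict String (List (Int × Int))) :=
    clusters.items.foldl (fun o q =>
      o.insert q.1 (q.2.items.foldl (fun m r => m.insert r.1 (pvMergedB r.2)) PySem.Dict.empty))
      PySem.Dict.empty
  out.items.map (fun q => (q.1, q.2.items))

-- ===== PRECONDITION & SPEC =====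
-- Pre_ excludes exactly the inputs where labels is longer than file_map or line_ranges, on which
-- the Python A raises IndexError at file_map[idx] / line_ranges[idx].
def Pre_group_clusters (file_map : List String) (line_ranges : List (Int × Int)) (labels : List Int) : Prop :=
  labels.length ≤ file_map.length ∧ labels.length ≤ line_ranges.length
instance (file_map : List String) (line_ranges : List (Int × Int)) (labels : List Int) : Decidable (Pre_group_clusters file_map line_ranges labels) := by unfold Pre_group_clusters; infer_instance

def pvWitness_group_clusters : List String × (List (Int × Int)) × List Int :=
  (["a", "b", "a"], [(1, 3), (0, 2), (3, 5)], [1, 2, 1])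

def Spec_group_clusters (file_map : List String) (line_ranges : List (Int × Int)) (labels : List Int) (out : List (Int × List (String × List (Int × Int)))) : Prop := out = group_clusters_alt file_map line_ranges labels
instance (file_map : List String) (line_ranges : List (Int × Int)) (labels : List Int) (out : List (Int × List (String × List (Int × Int)))) : Decidable (Spec_group_clusters file_map line_ranges labels out) := by unfold Spec_group_clusters; infer_instance

-- ===== CLAIM =====
def Claim_equal_group_clusters : Prop := ∀ (file_map : List String) (line_ranges : List (Int × Int)) (labels : List Int), Dom_group_clusters file_map line_ranges labels → Pre_group_clusters file_map line_ranges labels → Spec_group_clusters file_map line_ranges labels (group_clusters file_map line_ranges labels)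

-- ===== LEMMAS AND PROOFS =====

-- generic dict-loop facts shared by both sides

lemma pvGetD_foldl_modify_key {κ ν β : Type} [BEq κ] [LawfulBEq κ] [DecidableEq κ]
    (key : β → κ) (d0 : ν) (f : ν → β → ν) :
    ∀ (l : List β) (d : PySem.Dict κ ν) (c : κ),
      (l.foldl (fun d a => d.modify (key a) d0 (fun v => f v a)) d).getD c d0
      = (l.filter (fun a => key a == c)).foldl f (d.getD c d0) := by
  intro l
  induction l with
  | nil => intro d c; simp
  | cons a rest ih =>
    intro d c
    simp only [List.foldl_cons, List.filter_cons]
    by_cases h : key a = c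
    · simp [ih, h]
    · have hb : (key a == c) = false := by simp [h]
      rw [ih, hb]
      simp [PySem.Dict.getD_modify, Ne.symm h]

lemma pvGet?_foldl_insert_untouched {κ ν β : Type} [BEq κ] [LawfulBEq κ]
    (k : β → κ) (v : β → ν) :
    ∀ (l : List β) (d : PySem.Dict κ ν) (c : κ), c ∉ l.map k →
      (l.foldl (fun d a => d.insert (k a) (v a)) d).get? c = d.get? c := by
  intro l
  induction l with
  | nil => intro d c _; simp
  | cons a rest ih =>
    intro d c hc
    simp only [List.map_cons, List.mem_cons, not_or] at hc
    simp only [List.foldl_cons]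
    rw [ih _ _ hc.2, PySem.Dict.get?_insert_of_ne _ _ hc.1]

lemma pvGet?_foldl_insert {κ ν β : Type} [BEq κ] [LawfulBEq κ]
    (k : β → κ) (v : β → ν) :
    ∀ (l : List β), (l.map k).Nodup → ∀ (d : PySem.Dict κ ν) (c : κ),
      (l.foldl (fun d a => d.insert (k a) (v a)) d).get? c
      = (match l.find? (fun a => k a == c) with
         | some a => some (v a)
         | none => d.get? c) := by
  intro l
  induction l with
  | nil => intro _ d c; simp
  | cons a rest ih =>
    intro hnd d c
    simp only [List.map_cons, List.nodup_cons] at hnd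
    simp only [List.foldl_cons, List.find?_cons]
    by_cases h : k a = c
    · have hb : (k a == c) = true := by simp [h]
      rw [hb]
      subst h
      rw [pvGet?_foldl_insert_untouched k v rest _ _ hnd.1]
      simp [PySem.Dict.get?_insert_self]
    · have hb : (k a == c) = false := by simp [h]
      rw [hb, ih hnd.2]
      cases hf : rest.find? (fun a => k a == c) with
      | some b => simp
      | none => simp [PySem.Dict.get?_insert_of_ne _ _ (Ne.symm h)]

lemma pvKeys_foldl_insert_sub {κ ν β : Type} [BEq κ] [LawfulBEq κ]
    (k : β → κ) (v : β → ν) :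
    ∀ (l : List β) (d : PySem.Dict κ ν), (∀ a ∈ l, d.contains (k a) = true) →
      (l.foldl (fun d a => d.insert (k a) (v a)) d).keys = d.keys := by
  intro l
  induction l with
  | nil => intro d _; simp
  | cons a rest ih =>
    intro d hd
    simp only [List.foldl_cons]
    rw [ih _ (fun b hb => by
        rw [PySem.Dict.contains_insert]
        simp [hd b (List.mem_cons_of_mem _ hb)]),
      PySem.Dict.keys_insert_of_contains _ _ (hd a (List.mem_cons_self ..))]

lemma pvFind?_self {κ : Type} [BEq κ] [LawfulBEq κ] :
    ∀ (l : List κ) (c : κ), c ∈ l → l.find? (fun k => k == c) = some c := by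
  intro l
  induction l with
  | nil => intro c hc; simp at hc
  | cons a rest ih =>
    intro c hc
    by_cases h : a = c
    · subst h; simp
    · have : c ∈ rest := by
        rcases List.mem_cons.1 hc with h' | h'
        · exact absurd h'.symm h
        · exact h'
      simp [h, ih c this]

-- run-recursion form of the merge, shared target of both merge proofs

def pvMergeGroupB : Int → Int → List (Int × Int) → ((Int × Int) × List (Int × Int))
  | s, e, [] => ((s, e), [])
  | s, e, (s2, e2) :: rest =>
    if s2 ≤ e then pvMergeGroupB s (if e2 > e then e2 else e) rest
    else ((s, e), (s2, e2) :: rest)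

theorem pvMergeGroupB_rest_le (s e : Int) (l : List (Int × Int)) :
    (pvMergeGroupB s e l).2.length ≤ l.length := by
  induction l generalizing e with
  | nil => simp [pvMergeGroupB]
  | cons a rest ih =>
    obtain ⟨s2, e2⟩ := a
    simp only [pvMergeGroupB]
    split
    · exact le_trans (ih _) (by simp)
    · simp

def pvMergeRecB : List (Int × Int) → List (Int × Int)
  | [] => []
  | (s, e) :: rest => (pvMergeGroupB s e rest).1 :: pvMergeRecB (pvMergeGroupB s e rest).2
termination_by l => l.length
decreasing_by exact Nat.lt_succ_of_le (pvMergeGroupB_rest_le _ _ _)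

-- A's merge loop computes the run recursion

lemma pvMergeLoopA_eq : ∀ (l acc : List (Int × Int)) (s e : Int),
    pvMergeLoopA (acc ++ [(s, e)]) l = acc ++ pvMergeRecB ((s, e) :: l) := by
  intro l
  induction l with
  | nil => intro acc s e; simp [pvMergeLoopA, pvMergeRecB, pvMergeGroupB]
  | cons a rest ih =>
    intro acc s e
    obtain ⟨s2, e2⟩ := a
    simp only [pvMergeLoopA, List.getLastD_concat, List.dropLast_concat]
    by_cases h : s2 ≤ e
    · rw [if_pos h, ih acc s (max e e2)]
      have hmax : (if e2 > e then e2 else e) = max e e2 := by omega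
      simp only [pvMergeRecB, pvMergeGroupB, if_pos h, hmax]
    · rw [if_neg h, ih (acc ++ [(s, e)]) s2 e2]
      simp only [pvMergeRecB, pvMergeGroupB, if_neg h, List.append_assoc, List.cons_append,
        List.nil_append]

lemma pvMerge_eq (l : List (Int × Int)) :
    merge_intervals l = pvMergeRecB (PySem.List.sorted l (fun x => x.1) false) := by
  unfold merge_intervals
  by_cases h : l = []
  · subst h
    rw [if_pos rfl, (PySem.List.sorted_eq_nil_iff _ _ _).2 rfl]
    simp [pvMergeRecB]
  · rw [if_neg h]
    rcases hs : PySem.List.sorted l (fun x => x.1) false with _ | ⟨⟨s, e⟩, t⟩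
    · exact absurd ((PySem.List.sorted_eq_nil_iff _ _ _).1 hs) h
    · simpa using pvMergeLoopA_eq t [] s e

-- B's staged merge also computes the run recursion (on a start-sorted list)

def pvFlagsFrom : Int → List (Int × Int) → List Bool
  | _, [] => []
  | m, (s, e) :: t => decide (s > m) :: pvFlagsFrom (max m e) t

def pvGrp : List (Int × Int) → List ((Int × Int) × Bool) → List (List (Int × Int))
  | r, [] => [r]
  | r, (iv, b) :: t => if b then r :: pvGrp [iv] t else pvGrp (r ++ [iv]) t

def pvAggEnd (run : List (Int × Int)) : Int :=
  (run.drop 1).foldl (fun m p => if p.2 > m then p.2 else m) (run.headD (0, 0)).2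

def pvAgg (run : List (Int × Int)) : Int × Int := ((run.headD (0, 0)).1, pvAggEnd run)

lemma pvPmax_shift : ∀ (xs : List Int) (acc : List Int) (m : Int),
    xs.foldl (fun pm e => pm ++ [max (pm.getLastD 0) e]) (acc ++ [m])
      = acc ++ xs.foldl (fun pm e => pm ++ [max (pm.getLastD 0) e]) [m] := by
  intro xs
  induction xs with
  | nil => intro acc m; simp
  | cons x xs ih =>
    intro acc m
    simp only [List.foldl_cons, List.getLastD_concat]
    have h1 : (acc ++ [m]) ++ [max m x] = (acc ++ [m]) ++ [max m x] := rfl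
    rw [ih (acc ++ [m]) (max m x)]
    have h2 : ([m] : List Int).getLastD 0 = m := rfl
    rw [h2]
    have h3 : ([m] : List Int) ++ [max m x] = [m] ++ [max m x] := rfl
    rw [ih [m] (max m x)]
    simp

lemma pvFlags_eq : ∀ (rest : List (Int × Int)) (e0 : Int),
    (rest.zip ((rest.map (fun p => p.2)).foldl
        (fun pm e => pm ++ [max (pm.getLastD 0) e]) [e0])).map
      (fun t => decide (t.1.1 > t.2))
      = pvFlagsFrom e0 rest := by
  intro rest
  induction rest with
  | nil => intro e0; rfl
  | cons p t ih =>
    intro e0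
    obtain ⟨s1, e1⟩ := p
    simp only [List.map_cons, List.foldl_cons]
    have h2 : ([e0] : List Int).getLastD 0 = e0 := rfl
    rw [h2, pvPmax_shift (t.map (fun p => p.2)) [e0] (max e0 e1)]
    simp only [List.cons_append, List.nil_append, List.zip_cons_cons, List.map_cons]
    rw [ih (max e0 e1)]
    rfl

lemma pvGrp_fold : ∀ (zs : List ((Int × Int) × Bool)) (rs : List (List (Int × Int)))
    (r : List (Int × Int)),
    zs.foldl (fun acc t =>
        if t.2 then acc ++ [[t.1]] else acc.dropLast ++ [acc.getLastD [] ++ [t.1]]) (rs ++ [r])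
      = rs ++ pvGrp r zs := by
  intro zs
  induction zs with
  | nil => intro rs r; simp [pvGrp]
  | cons z t ih =>
    intro rs r
    obtain ⟨iv, b⟩ := z
    simp only [List.foldl_cons]
    cases b with
    | true =>
      simp only [if_true]
      rw [show (rs ++ [r]) ++ [[iv]] = (rs ++ [r]) ++ [[iv]] from rfl, ih (rs ++ [r]) [iv]]
      simp [pvGrp]
    | false =>
      simp only [List.dropLast_concat, List.getLastD_concat]
      simp only [if_false, Bool.false_eq_true]
      rw [ih rs (r ++ [iv])]
      simp [pvGrp]

lemma pvHeadD_append (run : List (Int × Int)) (p : Int × Int) (h : run ≠ []) :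
    (run ++ [p]).headD (0, 0) = run.headD (0, 0) := by
  cases run with
  | nil => exact absurd rfl h
  | cons a t => simp

lemma pvAggEnd_append (run : List (Int × Int)) (p : Int × Int) (h : run ≠ []) :
    pvAggEnd (run ++ [p]) = if p.2 > pvAggEnd run then p.2 else pvAggEnd run := by
  cases run with
  | nil => exact absurd rfl h
  | cons a t => simp [pvAggEnd, List.foldl_append]

lemma pvFlags_restart : ∀ (t : List (Int × Int)) (M x : Int), (∀ p ∈ t, M < p.1) →
    pvFlagsFrom (max M x) t = pvFlagsFrom x t := by
  intro t
  induction t with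
  | nil => intro M x _; rfl
  | cons p t ih =>
    intro M x h
    obtain ⟨s, e⟩ := p
    have hs : M < s := h (s, e) (List.mem_cons_self ..)
    simp only [pvFlagsFrom]
    congr 1
    · rw [decide_eq_decide]
      omega
    · rw [max_assoc]
      exact ih M (max x e) (fun q hq => h q (List.mem_cons_of_mem _ hq))

lemma pvGrp_merge : ∀ (rest : List (Int × Int)), rest.Pairwise (fun a b => a.1 ≤ b.1) →
    ∀ (m : Int) (run : List (Int × Int)), run ≠ [] → pvAggEnd run = m →
    (pvGrp run (rest.zip (pvFlagsFrom m rest))).map pvAgg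
      = (pvMergeGroupB (run.headD (0, 0)).1 m rest).1
          :: pvMergeRecB (pvMergeGroupB (run.headD (0, 0)).1 m rest).2 := by
  intro rest
  induction rest with
  | nil =>
    intro _ m run hne hm
    simp [pvFlagsFrom, pvGrp, pvMergeGroupB, pvMergeRecB, pvAgg, hm]
  | cons p t ih =>
    intro hpw m run hne hm
    obtain ⟨s1, e1⟩ := p
    have hpwt : t.Pairwise (fun a b => a.1 ≤ b.1) := hpw.of_cons
    have hhead : ∀ q ∈ t, s1 ≤ q.1 := (List.pairwise_cons.1 hpw).1
    simp only [pvFlagsFrom, List.zip_cons_cons, pvGrp]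
    by_cases h : s1 ≤ m
    · have hd : decide (s1 > m) = false := by
        rw [decide_eq_false_iff_not]
        omega
      rw [hd]
      simp only [Bool.false_eq_true, if_false]
      have hmax : (if e1 > m then e1 else m) = max m e1 := by
        split <;> omega
      have happ : pvAggEnd (run ++ [(s1, e1)]) = max m e1 := by
        rw [pvAggEnd_append _ _ hne, hm]
        split <;> omega
      rw [ih hpwt (max m e1) (run ++ [(s1, e1)]) (by simp) happ,
        pvHeadD_append _ _ hne]
      simp only [pvMergeGroupB, if_pos h, hmax]
    · have hd : decide (s1 > m) = true := by
        rw [decide_eq_true_eq]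
        omega
      rw [hd]
      simp only [if_true, List.map_cons]
      rw [pvFlags_restart t m e1 (fun q hq => lt_of_lt_of_le (by omega) (hhead q hq))]
      rw [ih hpwt e1 [(s1, e1)] (by simp) (by simp [pvAggEnd])]
      simp only [pvMergeGroupB, if_neg h, List.headD_cons]
      have : pvMergeRecB ((s1, e1) :: t)
          = (pvMergeGroupB s1 e1 t).1 :: pvMergeRecB (pvMergeGroupB s1 e1 t).2 := by
        simp [pvMergeRecB]
      rw [← this]
      simp [pvAgg, hm]

lemma pvMergedB_eq (l : List (Int × Int)) :
    pvMergedB l = pvMergeRecB (PySem.List.sorted l (fun p => p.1) false) := by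
  unfold pvMergedB
  rcases hs : PySem.List.sorted l (fun p => p.1) false with _ | ⟨⟨s0, e0⟩, rest⟩
  · simp [pvMergeRecB]
  · have hpw : rest.Pairwise (fun a b => a.1 ≤ b.1) := by
      have := PySem.List.sorted_pairwise l (fun p : Int × Int => p.1)
      rw [hs] at this
      exact this.of_cons
    simp only [List.cons_ne_nil, List.map_cons, List.drop_succ_cons, List.drop_zero,
      List.take_succ_cons, List.take_zero, List.zip_cons_cons, List.foldl_cons, if_true,
      List.nil_append, reduceIte]
    rw [pvFlags_eq rest e0]
    have h4 := pvGrp_fold (rest.zip (pvFlagsFrom e0 rest)) [] [(s0, e0)]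
    rw [List.nil_append, List.nil_append] at h4
    rw [h4, PySem.List.foldl_append_singleton_eq_map, List.nil_append]
    have h5 := pvGrp_merge rest hpw e0 [(s0, e0)] (by simp) (by simp [pvAggEnd])
    simp only [List.headD_cons] at h5
    rw [show (fun (run : List (Int × Int)) => ((run.headD ((0 : Int), (0 : Int))).1,
        (run.drop 1).foldl (fun m p => if p.2 > m then p.2 else m) (run.headD (0, 0)).2))
      = pvAgg from rfl]
    rw [h5]
    simp [pvMergeRecB]

lemma pvMerge_eq_mergedB (l : List (Int × Int)) : merge_intervals l = pvMergedB l := by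
  rw [pvMerge_eq, pvMergedB_eq]

-- common normal form of the grouping

def pvIvs (ts : List (String × ((Int × Int) × Int))) (lab : Int) (f : String) : List (Int × Int) :=
  ((ts.filter (fun t => t.2.2 == lab)).filter (fun t => t.1 == f)).map (fun t => t.2.1)
def pvFiles (ts : List (String × ((Int × Int) × Int))) (lab : Int) : List String :=
  PySem.Set.ofList ((ts.filter (fun t => t.2.2 == lab)).map (fun t => t.1))
def pvNormal (ts : List (String × ((Int × Int) × Int))) (M : List (Int × Int) → List (Int × Int)) :
    List (Int × List (String × List (Int × Int))) :=
  (PySem.Set.ofList (ts.map (fun t => t.2.2))).map (fun lab =>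
    (lab, (pvFiles ts lab).map (fun f => (f, M (pvIvs ts lab f)))))

def pvClGroup (ts : List (String × ((Int × Int) × Int))) :
    PySem.Dict Int (PySem.Dict String (List (Int × Int))) :=
  ts.foldl (fun cl t =>
    cl.modify t.2.2 PySem.Dict.empty (fun inner =>
      inner.modify t.1 [] (fun ivs => ivs ++ [t.2.1]))) PySem.Dict.empty

def pvMembers (ts : List (String × ((Int × Int) × Int))) (lab : Int) :
    PySem.Dict String (List (Int × Int)) :=
  (ts.filter (fun t => t.2.2 == lab)).foldl (fun inner t =>
    inner.modify t.1 [] (fun ivs => ivs ++ [t.2.1])) PySem.Dict.empty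

lemma pvBridge {σ : Type} (step : σ → String → (Int × Int) → Int → σ) :
    ∀ (labs : List Int) (s : Nat) (fm : List String) (lr : List (Int × Int)) (d : σ),
      s + labs.length ≤ fm.length → s + labs.length ≤ lr.length →
      ((PySem.List.enumerate labs (s : Int)).foldl
        (fun d p => step d (PySem.List.pyGetD fm p.1 "") (PySem.List.pyGetD lr p.1 (0, 0)) p.2) d)
      = ((fm.drop s).zip ((lr.drop s).zip labs)).foldl (fun d t => step d t.1 t.2.1 t.2.2) d := by
  intro labs
  induction labs with
  | nil => intro s fm lr d _ _; simp [PySem.List.enumerate]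
  | cons lab rest ih =>
    intro s fm lr d hf hl
    have hsf : s < fm.length := by simp at hf; omega
    have hsl : s < lr.length := by simp at hl; omega
    rw [PySem.List.enumerate_cons, List.drop_eq_getElem_cons hsf, List.drop_eq_getElem_cons hsl]
    simp only [List.zip_cons_cons, List.foldl_cons]
    rw [PySem.List.pyGetD_natCast, PySem.List.pyGetD_natCast,
      List.getD_eq_getElem _ _ hsf, List.getD_eq_getElem _ _ hsl]
    have hcast : ((s : Int) + 1) = ((s + 1 : Nat) : Int) := by push_cast; ring
    rw [hcast, ih (s + 1) fm lr _ (by simp at hf ⊢; omega) (by simp at hl ⊢; omega)]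

lemma pvCl1_eq (file_map : List String) (line_ranges : List (Int × Int)) (labels : List Int)
    (hf : labels.length ≤ file_map.length) (hl : labels.length ≤ line_ranges.length) :
    pvCl1 file_map line_ranges labels = pvClGroup (file_map.zip (line_ranges.zip labels)) := by
  have h := pvBridge (fun cl f r lab =>
      cl.modify lab PySem.Dict.empty (fun inner =>
        inner.modify f [] (fun ivs => ivs ++ [r])))
    labels 0 file_map line_ranges PySem.Dict.empty (by simpa) (by simpa)
  simpa [pvCl1, pvClGroup] using h

lemma pvClGroup_keys (ts : List (String × ((Int × Int) × Int))) :
    (pvClGroup ts).keys = PySem.Set.ofList (ts.map (fun t => t.2.2)) := by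
  have := PySem.Dict.keys_foldl_modify_key ts (fun t => t.2.2) PySem.Dict.empty
    (fun _ t => fun inner => inner.modify t.1 [] (fun ivs => ivs ++ [t.2.1])) PySem.Dict.empty
  simpa [pvClGroup] using this

lemma pvClGroup_getD (ts : List (String × ((Int × Int) × Int))) (lab : Int) :
    (pvClGroup ts).getD lab PySem.Dict.empty = pvMembers ts lab := by
  rw [pvClGroup, pvGetD_foldl_modify_key (fun t : String × ((Int × Int) × Int) => t.2.2)
    PySem.Dict.empty
    (fun inner t => inner.modify t.1 [] (fun ivs => ivs ++ [t.2.1])) ts PySem.Dict.empty lab,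
    PySem.Dict.getD_empty, pvMembers]

lemma pvMembers_keys (ts : List (String × ((Int × Int) × Int))) (lab : Int) :
    (pvMembers ts lab).keys = pvFiles ts lab := by
  have := PySem.Dict.keys_foldl_modify_key (ts.filter (fun t => t.2.2 == lab))
    (fun t : String × ((Int × Int) × Int) => t.1) []
    (fun _ t => fun ivs => ivs ++ [t.2.1]) PySem.Dict.empty
  simpa [pvMembers, pvFiles] using this

lemma pvMembers_getD (ts : List (String × ((Int × Int) × Int))) (lab : Int) (f : String) :
    (pvMembers ts lab).getD f [] = pvIvs ts lab f := by
  rw [pvMembers, ← List.foldl_map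
    (f := fun t : String × ((Int × Int) × Int) => (t.1, t.2.1))
    (g := fun (d : PySem.Dict String (List (Int × Int))) p => d.modify p.1 [] (fun ivs => ivs ++ [p.2])),
    PySem.Dict.getD_foldl_modify_append, List.filter_map, List.map_map]
  simp only [PySem.Dict.getD_empty, List.nil_append]
  rfl

-- A's second phase rewrites the dict it iterates over

lemma pvSelf_keys {κ ν : Type} [BEq κ] [LawfulBEq κ] (g : κ × ν → ν) (d : PySem.Dict κ ν) :
    (d.items.foldl (fun c q => c.insert q.1 (g q)) d).keys = d.keys := by
  apply pvKeys_foldl_insert_sub (fun q : κ × ν => q.1) g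
  intro a ha
  rw [PySem.Dict.contains_iff_mem_keys]
  exact PySem.Dict.mem_keys_of_mem_items _ ha

lemma pvSelf_get? {κ ν : Type} [BEq κ] [LawfulBEq κ] (g : κ × ν → ν) (d : PySem.Dict κ ν)
    (hnd : d.keys.Nodup) (c : κ) (hc : c ∈ d.keys) (dflt : ν) :
    (d.items.foldl (fun cl q => cl.insert q.1 (g q)) d).get? c = some (g (c, d.getD c dflt)) := by
  rw [pvGet?_foldl_insert (fun q : κ × ν => q.1) g d.items (by simpa [PySem.Dict.keys] using hnd) d c]
  rw [PySem.Dict.items_eq_map_keys d hnd dflt, List.find?_map,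
    show ((fun q : κ × ν => q.1 == c) ∘ (fun k => (k, d.getD k dflt))) = (fun k => k == c) from rfl,
    pvFind?_self _ _ hc]
  simp

lemma pvSelf_items {κ ν : Type} [BEq κ] [LawfulBEq κ] (g : κ × ν → ν) (d : PySem.Dict κ ν)
    (hnd : d.keys.Nodup) (dflt : ν) :
    (d.items.foldl (fun c q => c.insert q.1 (g q)) d).items
      = d.keys.map (fun k => (k, g (k, d.getD k dflt))) := by
  rw [PySem.Dict.items_eq_map_keys _ (by rw [pvSelf_keys]; exact hnd) dflt, pvSelf_keys]
  apply List.map_congr_left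
  intro k hk
  rw [PySem.Dict.getD_of_get?_eq_some _ dflt (pvSelf_get? g d hnd k hk dflt)]

def pvMrg (r : String × List (Int × Int)) : List (Int × Int) := merge_intervals r.2

def pvG (q : Int × PySem.Dict String (List (Int × Int))) : PySem.Dict String (List (Int × Int)) :=
  q.2.items.foldl (fun m r => m.insert r.1 (pvMrg r)) q.2

lemma pvA_normal (file_map : List String) (line_ranges : List (Int × Int)) (labels : List Int)
    (hf : labels.length ≤ file_map.length) (hl : labels.length ≤ line_ranges.length) :
    group_clusters file_map line_ranges labels
      = pvNormal (file_map.zip (line_ranges.zip labels)) merge_intervals := by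
  have hdef : group_clusters file_map line_ranges labels
      = ((pvCl1 file_map line_ranges labels).items.foldl
          (fun cl q => cl.insert q.1 (pvG q)) (pvCl1 file_map line_ranges labels)).items.map
            (fun q => (q.1, q.2.items)) := rfl
  rw [hdef, pvCl1_eq _ _ _ hf hl]
  rw [pvSelf_items pvG (pvClGroup (file_map.zip (line_ranges.zip labels)))
    (by rw [pvClGroup_keys]; exact PySem.Set.nodup_ofList _) PySem.Dict.empty, List.map_map]
  rw [pvNormal, pvClGroup_keys]
  apply List.map_congr_left
  intro lab _
  simp only [Function.comp_apply]
  congr 1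
  rw [pvClGroup_getD]
  rw [show pvG (lab, pvMembers (file_map.zip (line_ranges.zip labels)) lab)
      = (pvMembers (file_map.zip (line_ranges.zip labels)) lab).items.foldl
          (fun m r => m.insert r.1 (pvMrg r))
          (pvMembers (file_map.zip (line_ranges.zip labels)) lab) from rfl]
  rw [pvSelf_items pvMrg (pvMembers (file_map.zip (line_ranges.zip labels)) lab)
    (by rw [pvMembers_keys]; exact PySem.Set.nodup_ofList _) []]
  rw [pvMembers_keys]
  apply List.map_congr_left
  intro f _
  rw [show pvMrg (f, (pvMembers (file_map.zip (line_ranges.zip labels)) lab).getD f [])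
      = merge_intervals ((pvMembers (file_map.zip (line_ranges.zip labels)) lab).getD f []) from rfl,
    pvMembers_getD]

-- B's second phase rebuilds fresh dicts from the items it iterates over

lemma pvEmpty_items {κ ν : Type} [BEq κ] : (PySem.Dict.empty : PySem.Dict κ ν).items = [] := rfl

lemma pvB_normal (file_map : List String) (line_ranges : List (Int × Int)) (labels : List Int) :
    group_clusters_alt file_map line_ranges labels
      = pvNormal (file_map.zip (line_ranges.zip labels)) pvMergedB := by
  have hdef : group_clusters_alt file_map line_ranges labels
      = ((pvClGroup (file_map.zip (line_ranges.zip labels))).items.foldl (fun o q =>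
          o.insert q.1 (q.2.items.foldl (fun m r => m.insert r.1 (pvMergedB r.2))
            PySem.Dict.empty)) PySem.Dict.empty).items.map (fun q => (q.1, q.2.items)) := rfl
  rw [hdef]
  have hknd : (pvClGroup (file_map.zip (line_ranges.zip labels))).keys.Nodup := by
    rw [pvClGroup_keys]; exact PySem.Set.nodup_ofList _
  rw [PySem.Dict.items_foldl_insert_fresh _ _ _ _ (fun a _ => PySem.Dict.contains_empty _)
    (by simpa [PySem.Dict.keys] using hknd), pvEmpty_items, List.nil_append, List.map_map]
  rw [PySem.Dict.items_eq_map_keys _ hknd PySem.Dict.empty, List.map_map]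
  rw [pvNormal, pvClGroup_keys]
  apply List.map_congr_left
  intro lab _
  simp only [Function.comp_apply]
  congr 1
  rw [pvClGroup_getD]
  have hind : (pvMembers (file_map.zip (line_ranges.zip labels)) lab).keys.Nodup := by
    rw [pvMembers_keys]; exact PySem.Set.nodup_ofList _
  rw [PySem.Dict.items_foldl_insert_fresh _ _ _ _ (fun a _ => PySem.Dict.contains_empty _)
    (by simpa [PySem.Dict.keys] using hind), pvEmpty_items, List.nil_append]
  rw [PySem.Dict.items_eq_map_keys _ hind [], List.map_map, pvMembers_keys]
  apply List.map_congr_left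
  intro f _
  simp only [Function.comp_apply]
  rw [pvMembers_getD]

-- ===== VERDICT (by name: the statement is the Claim_ definition above) =====
theorem group_clusters_spec : Claim_equal_group_clusters := by
  intro file_map line_ranges labels _ hpre
  unfold Spec_group_clusters
  rw [pvA_normal file_map line_ranges labels hpre.1 hpre.2, pvB_normal]
  unfold pvNormal
  simp only [pvMerge_eq_mergedB]
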